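-- pv_equiv track=rewrite | github.com/Zofia-Opolska/prg-basics | TEST2.MOCK-2/p10.py | f
-- ===== SOURCE A (Python) =====
-- def f(array):
--     smallest_value = float('inf')
--     a=-1
--     b=-1
--     for row in range(len(array)):
--         for i in range(len(array[row])):
--             if array[row][i] < smallest_value:
--                 smallest_value = array[row][i]
--                 b = i
--                 a = row
--     return a == b
-- ===== SOURCE B (Python) =====
-- def f(array):
--     # stage 1: global minimum value of the flattened array (empty -> vacuously diagonal)
--     values = [v for row in array for v in row]
--     if not values:
--         return True
--     m = min(values)
--     # stage 2: locate the first occurrence of m, row by row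
--     for r, row in enumerate(array):
--         if m in row:
--             return r == row.index(m)
-- ===== Notes on version B (the rewrite author's own statement) =====
-- stated objective: alternative
-- what changed: Replaces A's single-pass running-minimum loop with inf/-1 sentinel state by two staged passes: first compute the global minimum value of the flattened array with min(), then locate its first occurrence row by row with 'in'/list.index and compare row to column (empty array gives True, matching A's -1 == -1).
import Mathlib
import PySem

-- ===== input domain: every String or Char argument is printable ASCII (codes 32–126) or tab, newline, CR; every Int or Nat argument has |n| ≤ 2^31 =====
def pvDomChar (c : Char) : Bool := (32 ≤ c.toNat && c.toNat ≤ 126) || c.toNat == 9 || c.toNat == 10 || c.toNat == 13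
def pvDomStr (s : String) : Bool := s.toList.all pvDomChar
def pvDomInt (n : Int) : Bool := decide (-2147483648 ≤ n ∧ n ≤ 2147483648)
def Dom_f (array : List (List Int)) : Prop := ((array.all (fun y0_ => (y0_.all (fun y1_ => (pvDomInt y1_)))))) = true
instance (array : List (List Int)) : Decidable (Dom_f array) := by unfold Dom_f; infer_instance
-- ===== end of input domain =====

-- B replaces A's single-pass running-minimum tracking by two staged passes (global min of the
-- flattened values, then locate its first occurrence row by row); same O(n) cost, different decomposition.

-- ===== PORT A =====
-- running minimum with inf sentinel (none = float('inf')) and indices a, b starting at -1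
def f (array : List (List Int)) : Bool :=
  let res := (PySem.List.pyRange 0 (PySem.List.len array) 1).foldl
    (fun st row =>
      let rowList := PySem.List.pyGetD array row []
      (PySem.List.pyRange 0 (PySem.List.len rowList) 1).foldl
        (fun (st : Option Int × Int × Int) i =>
          let v := PySem.List.pyGetD rowList i 0
          match st.1 with
          | none => (some v, row, i)
          | some m => if v < m then (some v, row, i) else st)
        st)
    ((none : Option Int), (-1 : Int), (-1 : Int))
  res.2.1 == res.2.2

-- ===== PORT B =====
-- stage 2 of Source B: first row containing m; `m in row` and row.index(m); the [] case is unreachable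
def fAltFind (m : Int) : List (Int × List Int) → Bool
  | [] => false
  | (r, row) :: rest =>
      if row.contains m then r == (((PySem.List.index? row m).getD 0 : Nat) : Int)
      else fAltFind m rest

-- flatten the values; empty → True; else global min, then the staged search
def f_alt (array : List (List Int)) : Bool :=
  let values := array.flatMap (fun row => row)
  match PySem.List.min? values (fun y => y) with
  | none => true
  | some m => fAltFind m (PySem.List.enumerate array 0)

-- ===== PRECONDITION & SPEC =====
def Spec_f (array : List (List Int)) (out : Bool) : Prop := out = f_alt array
instance (array : List (List Int)) (out : Bool) : Decidable (Spec_f array out) := by unfold Spec_f; infer_instance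

-- ===== CLAIM (what is proved, stated in full; the proofs are below) =====
def Claim_equal_f : Prop := ∀ (array : List (List Int)), Dom_f array → Spec_f array (f array)

-- ===== LEMMAS AND PROOFS =====

-- the cells of the array in row-major order, and the value at a cell
def pvCells (array : List (List Int)) : List (Int × Int) :=
  (PySem.List.enumerate array 0).flatMap
    (fun rrow => (PySem.List.pyRange 0 (PySem.List.len rrow.2) 1).map (fun c => (rrow.1, c)))

def pvKey (array : List (List Int)) (rc : Int × Int) : Int :=
  PySem.List.pyGetD (PySem.List.pyGetD array rc.1 []) rc.2 0

-- A's loop body, phrased on cells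
def pvStep (array : List (List Int)) (st : Option Int × Int × Int) (rc : Int × Int) :
    Option Int × Int × Int :=
  match st.1 with
  | none => (some (pvKey array rc), rc.1, rc.2)
  | some m => if pvKey array rc < m then (some (pvKey array rc), rc.1, rc.2) else st

-- Python min(key)'s first-tie fold on the pair level
def pvMin2 (array : List (List Int)) (p x : Int × Int) : Int × Int :=
  if pvKey array x < pvKey array p then x else p

lemma pvMinStep (array : List (List Int)) (c x : Int × Int) (t : List (Int × Int)) :
    PySem.List.min? (c :: x :: t) (pvKey array)
    = PySem.List.min? (pvMin2 array c x :: t) (pvKey array) := by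
  unfold PySem.List.min? pvMin2
  simp only [List.foldl_cons]
  split_ifs <;> rfl

lemma pvMinEq (array : List (List Int)) :
    ∀ (t : List (Int × Int)) (c : Int × Int),
      PySem.List.min? (c :: t) (pvKey array) = some (t.foldl (pvMin2 array) c) := by
  intro t
  induction t with
  | nil => intro c; rfl
  | cons x t ih =>
      intro c
      rw [pvMinStep, ih, List.foldl_cons]

lemma pvCorr (array : List (List Int)) :
    ∀ (cells : List (Int × Int)) (p : Int × Int),
      cells.foldl (pvStep array) (some (pvKey array p), p.1, p.2)
      = (some (pvKey array (cells.foldl (pvMin2 array) p)),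
         (cells.foldl (pvMin2 array) p).1, (cells.foldl (pvMin2 array) p).2) := by
  intro cells
  induction cells with
  | nil => intro p; rfl
  | cons x t ih =>
      intro p
      simp only [List.foldl_cons, pvStep, pvMin2]
      split_ifs <;> exact ih _

-- A's nested index loops are the fold of pvStep over the cell list
lemma pvNested (array : List (List Int)) (init : Option Int × Int × Int) :
    (PySem.List.pyRange 0 (PySem.List.len array) 1).foldl
      (fun st row =>
        let rowList := PySem.List.pyGetD array row []
        (PySem.List.pyRange 0 (PySem.List.len rowList) 1).foldl
          (fun (st : Option Int × Int × Int) i =>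
            let v := PySem.List.pyGetD rowList i 0
            match st.1 with
            | none => (some v, row, i)
            | some m => if v < m then (some v, row, i) else st)
          st)
      init
    = (pvCells array).foldl (pvStep array) init := by
  unfold pvCells
  rw [PySem.List.enumerate_eq_map_pyRange array ([] : List Int)]
  rw [List.flatMap_map, List.foldl_flatMap]
  refine PySem.List.foldl_congr_mem _ _ _ _ ?_
  intro st row _
  rw [List.foldl_map]
  rfl

-- A's result is Python min(cells, key) followed by the diagonal test
lemma pvAside (array : List (List Int)) :
    f array = (match PySem.List.min? (pvCells array) (pvKey array) with
               | none => true
               | some rc => rc.1 == rc.2) := by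
  unfold f
  rw [pvNested]
  cases h : pvCells array with
  | nil => rfl
  | cons c t =>
      simp only [List.foldl_cons]
      have h1 : pvStep array ((none : Option Int), (-1 : Int), (-1 : Int)) c
          = (some (pvKey array c), c.1, c.2) := rfl
      rw [h1, pvCorr, pvMinEq]

-- ===== B-side lemmas =====

-- the flattened values are the keys of the cells
lemma pvValues (array : List (List Int)) :
    (pvCells array).map (pvKey array) = array.flatMap (fun row => row) := by
  unfold pvCells pvKey
  rw [PySem.List.enumerate_eq_map_pyRange array ([] : List Int), List.flatMap_map, List.map_flatMap]
  simp only [List.map_map, Function.comp_def]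
  rw [show (fun j => ((PySem.List.pyRange 0 (PySem.List.len (PySem.List.pyGetD array j [])) 1).map
      (fun c => PySem.List.pyGetD (PySem.List.pyGetD array j []) c 0))) = fun j => PySem.List.pyGetD array j [] from
    funext (fun j => PySem.List.map_pyGetD_pyRange_zero _ _)]
  rw [List.flatMap_def, PySem.List.map_pyGetD_pyRange_zero, List.flatMap_def, List.map_id']

-- the key of the fold is the running minimum of the keys
lemma pvKeyFold (array : List (List Int)) :
    ∀ (t : List (Int × Int)) (c : Int × Int),
      pvKey array (t.foldl (pvMin2 array) c) = (t.map (pvKey array)).foldl min (pvKey array c) := by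
  intro t
  induction t with
  | nil => intro c; rfl
  | cons x t ih =>
      intro c
      simp only [List.foldl_cons, List.map_cons, ih]
      congr 1
      unfold pvMin2
      split_ifs with h <;> omega

-- every key is at least the fold's key
lemma pvFoldMin (array : List (List Int)) (t : List (Int × Int)) (c y : Int × Int)
    (hy : y ∈ c :: t) : pvKey array (t.foldl (pvMin2 array) c) ≤ pvKey array y :=
  PySem.List.min?_isMin (pvMinEq array t c) y hy

-- the fold's result is the FIRST cell attaining the minimal key
lemma pvFirst (array : List (List Int)) :
    ∀ (t : List (Int × Int)) (c : Int × Int),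
      (c :: t).find? (fun y => pvKey array y == pvKey array (t.foldl (pvMin2 array) c))
      = some (t.foldl (pvMin2 array) c) := by
  intro t
  induction t with
  | nil =>
      intro c
      simp
  | cons x t ih =>
      intro c
      simp only [List.foldl_cons]
      by_cases hx : pvKey array x < pvKey array c
      · have hw : pvMin2 array c x = x := by unfold pvMin2; rw [if_pos hx]
        rw [hw]
        have hle : pvKey array (t.foldl (pvMin2 array) x) ≤ pvKey array x :=
          pvFoldMin array t x x (by simp)
        rw [List.find?_cons_of_neg (by simp; omega)]
        exact ih x
      · have hw : pvMin2 array c x = c := by unfold pvMin2; rw [if_neg hx]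
        rw [hw]
        have hih := ih c
        by_cases hc : pvKey array c = pvKey array (t.foldl (pvMin2 array) c)
        · rw [List.find?_cons_of_pos (by simp [hc])]
          rw [List.find?_cons_of_pos (by simp [hc])] at hih
          exact hih
        · have hle : pvKey array (t.foldl (pvMin2 array) c) ≤ pvKey array c :=
            pvFoldMin array t c c (by simp)
          rw [List.find?_cons_of_neg (by simp; omega)]
          rw [List.find?_cons_of_neg (by simp; omega)] at hih
          rw [List.find?_cons_of_neg (by simp; omega)]
          exact hih

-- indices of the first occurrence of m in one row (Nat level)
lemma pvRowAux (m : Int) :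
    ∀ (row : List Int),
      (List.range row.length).find? (fun k => row.getD k 0 == m) = List.idxOf? m row := by
  intro row
  induction row with
  | nil => rfl
  | cons a row ih =>
      rw [List.length_cons, List.range_succ_eq_map, List.find?_cons]
      by_cases h : a = m
      · simp [h, List.idxOf?_cons]
      · have hh : ((a :: row).getD 0 0 == m) = false := by simp [h]
        rw [hh, List.find?_map]
        simp only [List.idxOf?_cons, beq_iff_eq]
        rw [if_neg (by exact fun hc => h (by simpa using hc))]
        rw [show ((fun k => (a :: row).getD k 0 == m) ∘ Nat.succ) = (fun k => row.getD k 0 == m) from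
          funext (fun k => rfl)]
        rw [ih]

-- locating the first index of m in one row (pyRange level)
lemma pvRowFind (row : List Int) (m : Int) :
    (PySem.List.pyRange 0 (PySem.List.len row) 1).find? (fun c => PySem.List.pyGetD row c 0 == m)
    = (List.idxOf? m row).map (fun k => (k : Int)) := by
  rw [PySem.List.pyRange_one, List.find?_map]
  rw [show ((PySem.List.len row) - 0).toNat = row.length from by simp [PySem.List.len]]
  rw [show ((fun c => PySem.List.pyGetD row c 0 == m) ∘ fun k : Nat => (0 : Int) + ↑k)
      = (fun k : Nat => row.getD k 0 == m) from funext (fun k => by simp)]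
  rw [pvRowAux]
  cases List.idxOf? m row <;> simp

-- B's staged row search is find-first over the cells
lemma pvSearch (array : List (List Int)) (m : Int) :
    ∀ (l : List (Int × List Int)),
      (∀ p ∈ l, PySem.List.pyGetD array p.1 [] = p.2) →
      fAltFind m l
      = (match (l.flatMap
            (fun rrow => (PySem.List.pyRange 0 (PySem.List.len rrow.2) 1).map (fun c => (rrow.1, c)))).find?
            (fun y => pvKey array y == m) with
         | none => false
         | some rc => rc.1 == rc.2) := by
  intro l
  induction l with
  | nil => intro _; rfl
  | cons p rest ih =>
      obtain ⟨r, row⟩ := p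
      intro hyp
      have hr : PySem.List.pyGetD array r [] = row := hyp (r, row) (by simp)
      rw [List.flatMap_cons, List.find?_append, List.find?_map]
      have hpred : ((fun y => pvKey array y == m) ∘ fun c => (r, c))
          = (fun c => PySem.List.pyGetD row c 0 == m) := by
        funext c
        simp [Function.comp, pvKey, hr]
      rw [hpred, pvRowFind]
      show fAltFind m ((r, row) :: rest) = _
      by_cases hm : m ∈ row
      · have hex : ∃ k, List.idxOf? m row = some k := by
          rw [← PySem.List.index?_eq_idxOf?]
          exact Option.isSome_iff_exists.mp ((PySem.List.index?_isSome_iff row m).mpr hm)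
        obtain ⟨k, hk⟩ := hex
        rw [hk]
        have hc : row.contains m = true := by simpa using hm
        show (if row.contains m then (r == (((PySem.List.index? row m).getD 0 : Nat) : Int))
              else fAltFind m rest) = _
        rw [hc, if_pos rfl, PySem.List.index?_eq_idxOf?, hk]
        rfl
      · have h0 : List.idxOf? m row = none := by
          rw [← PySem.List.index?_eq_idxOf?]
          exact (PySem.List.index?_eq_none_iff row m).mpr hm
        rw [h0]
        have hc : row.contains m = false := by simpa using hm
        show (if row.contains m then _ else fAltFind m rest) = _
        rw [hc, if_neg (by simp)]
        exact ih (fun q hq => hyp q (by simp [hq]))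

-- the enumerate pairs really index the array
lemma pvEnum (array : List (List Int)) :
    ∀ p ∈ PySem.List.enumerate array 0, PySem.List.pyGetD array p.1 [] = p.2 := by
  intro p hp
  rw [PySem.List.enumerate_eq_map_pyRange array ([] : List Int)] at hp
  obtain ⟨j, _, rfl⟩ := List.mem_map.mp hp
  rfl

theorem pv_main (array : List (List Int)) : f array = f_alt array := by
  have halt : f_alt array
      = (match PySem.List.min? (array.flatMap (fun row => row)) (fun y => y) with
         | none => true
         | some m => fAltFind m (PySem.List.enumerate array 0)) := rfl
  rw [pvAside, halt, ← pvValues]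
  cases h : pvCells array with
  | nil => rfl
  | cons c t =>
      rw [pvMinEq, List.map_cons, PySem.List.min?_id_cons]
      show ((t.foldl (pvMin2 array) c).1 == (t.foldl (pvMin2 array) c).2)
        = fAltFind ((t.map (pvKey array)).foldl min (pvKey array c)) (PySem.List.enumerate array 0)
      rw [pvSearch array _ (PySem.List.enumerate array 0) (pvEnum array),
          show ((PySem.List.enumerate array 0).flatMap
            (fun rrow => (PySem.List.pyRange 0 (PySem.List.len rrow.2) 1).map (fun c => (rrow.1, c))))
            = pvCells array from rfl,
          h,
          show (t.map (pvKey array)).foldl min (pvKey array c)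
            = pvKey array (t.foldl (pvMin2 array) c) from (pvKeyFold array t c).symm,
          pvFirst]

-- ===== VERDICT (by name: the statement is the Claim_ definition above) =====
theorem f_spec : Claim_equal_f := by
  intro array _
  exact pv_main array
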